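-- pv_equiv track=rewrite | github.com/swooshoo/PokeDexTop | data/database.py | calculate_generation
-- ===== SOURCE A (Python) =====
-- def calculate_generation(pokedex_number):
--     """Calculate generation from pokedex number"""
--     if not pokedex_number:
--         return None
--
--     generation_ranges = [
--         (1, 151, 1), (152, 251, 2), (252, 386, 3), (387, 493, 4), (494, 649, 5),
--         (650, 721, 6), (722, 809, 7), (810, 905, 8), (906, 1025, 9)
--     ]
--
--     for start, end, gen in generation_ranges:
--         if start <= pokedex_number <= end:
--             return gen
--     return 9  # Default to latest
-- ===== SOURCE B (Python) =====
-- def calculate_generation(pokedex_number):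
--     """Calculate generation from pokedex number"""
--     if not pokedex_number:
--         return None
--     if not (1 <= pokedex_number <= 1025):
--         return 9  # Default to latest
--     gen_starts = [152, 252, 387, 494, 650, 722, 810, 906]
--     return 1 + sum(pokedex_number >= s for s in gen_starts)
-- ===== Notes on version B (the rewrite author's own statement) =====
-- stated objective: simpler
-- what changed: Replaces the table of (start,end,gen) range triples and the linear range-scan with a count of generation-start boundaries not exceeding the number (1 + sum of pokedex_number >= start), after a single in-range check.
import Mathlib
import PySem

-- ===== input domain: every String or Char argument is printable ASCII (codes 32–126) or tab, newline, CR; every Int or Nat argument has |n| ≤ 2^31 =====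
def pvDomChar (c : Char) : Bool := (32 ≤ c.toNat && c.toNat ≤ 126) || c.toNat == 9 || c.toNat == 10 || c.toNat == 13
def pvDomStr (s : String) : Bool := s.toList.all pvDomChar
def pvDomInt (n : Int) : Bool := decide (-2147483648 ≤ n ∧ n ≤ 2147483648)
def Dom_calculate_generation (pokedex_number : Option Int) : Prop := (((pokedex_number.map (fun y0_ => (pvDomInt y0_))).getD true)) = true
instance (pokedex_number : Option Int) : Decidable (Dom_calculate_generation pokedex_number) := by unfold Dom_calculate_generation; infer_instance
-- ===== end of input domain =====

-- B replaces the range-triple scan with a count of generation-start boundaries (simpler).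

-- ===== PORT A =====
def pvGenRanges : List (Int × Int × Int) :=
  [(1, 151, 1), (152, 251, 2), (252, 386, 3), (387, 493, 4), (494, 649, 5),
   (650, 721, 6), (722, 809, 7), (810, 905, 8), (906, 1025, 9)]

-- the for-loop with early return, as structural recursion over the same list
def pvScanRanges (rs : List (Int × Int × Int)) (n : Int) : Int :=
  match rs with
  | [] => 9
  | (s, e, g) :: rest => if s ≤ n ∧ n ≤ e then g else pvScanRanges rest n

def calculate_generation (pokedex_number : Option Int) : Option Int :=
  match pokedex_number with
  | none => none
  | some n => if n = 0 then none else some (pvScanRanges pvGenRanges n)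

-- ===== PORT B =====
def pvGenStarts : List Int := [152, 252, 387, 494, 650, 722, 810, 906]

def calculate_generation_alt (pokedex_number : Option Int) : Option Int :=
  match pokedex_number with
  | none => none
  | some n =>
    if n = 0 then none
    else if ¬ (1 ≤ n ∧ n ≤ 1025) then some 9
    else some (1 + pvGenStarts.foldl (fun acc s => acc + (if n ≥ s then 1 else 0)) 0)

-- ===== PRECONDITION & SPEC =====
def Spec_calculate_generation (pokedex_number : Option Int) (out : Option Int) : Prop := out = calculate_generation_alt pokedex_number
instance (pokedex_number : Option Int) (out : Option Int) : Decidable (Spec_calculate_generation pokedex_number out) := by unfold Spec_calculate_generation; infer_instance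

-- ===== CLAIM (what is proved, stated in full; the proofs are below) =====
def Claim_equal_calculate_generation : Prop := ∀ (pokedex_number : Option Int), Dom_calculate_generation pokedex_number → Spec_calculate_generation pokedex_number (calculate_generation pokedex_number)

-- ===== LEMMAS AND PROOFS =====
set_option maxHeartbeats 4000000 in
theorem pv_some_case (n : Int) :
    pvScanRanges pvGenRanges n =
      (if ¬ (1 ≤ n ∧ n ≤ 1025) then 9
       else 1 + pvGenStarts.foldl (fun acc s => acc + (if n ≥ s then 1 else 0)) 0) := by
  simp only [pvScanRanges, pvGenRanges, pvGenStarts, List.foldl]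
  split_ifs <;> omega

-- ===== VERDICT (by name: the statement is the Claim_ definition above) =====
theorem calculate_generation_spec : Claim_equal_calculate_generation := by
  intro p _
  unfold Spec_calculate_generation calculate_generation calculate_generation_alt
  cases p with
  | none => rfl
  | some n =>
    by_cases h : n = 0
    · simp [h]
    · simp only [h, if_false]
      rw [pv_some_case n]
      split_ifs <;> rfl
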